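-- pv_equiv track=rewrite | github.com/senna-lang/algorithm | note/algo/binarySearch/darts.py | max_sum_of_four
-- ===== SOURCE A (Python) =====
-- import bisect
--
-- def max_sum_of_four(a, M):
--     n = len(a)
--
--     # 2個の和を全て列挙 O(N^2)
--     pair_sums = []
--     for i in range(n):
--         for j in range(n):  # 重複を許すので i から n まで
--             pair_sums.append(a[i] + a[j])
--
--     # ソート O(N^2 log N^2) = O(N^2 log N)
--     pair_sums.sort()
--
--     max_value = -1  # 見つからない場合は -1 など
--
--     # 各ペアの和について O(N^2)
--     for s1 in pair_sums:
--         if s1 > M: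
--             break
--
--         # s1 + s2 <= M となる最大の s2 を二分探索 O(log N^2) = O(log N)
--         target = M - s1
--
--         # target 以下の最大値を探す
--         # bisect_right(pair_sums, target) - 1 が target 以下の最後の位置
--         pos = bisect.bisect_right(pair_sums, target) - 1
--
--         if pos >= 0:
--             s2 = pair_sums[pos]
--             max_value = max(max_value, s1 + s2)
--
--     return max_value
-- ===== SOURCE B (Python) =====
-- def max_sum_of_four(a, M):
--     # two-pointer sweep over the sorted pair sums instead of a bisect per element
--     pair_sums = sorted(x + y for x in a for y in a)
--     best = -1
--     j = len(pair_sums) - 1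
--     for s1 in pair_sums:
--         if s1 > M:
--             break
--         while j >= 0 and pair_sums[j] > M - s1:
--             j -= 1
--         if j >= 0:
--             best = max(best, s1 + pair_sums[j])
--     return best
-- ===== Notes on version B (the rewrite author's own statement) =====
-- stated objective: alternative
-- what changed: Replaced the per-element bisect_right binary search over the sorted pair sums with a single monotone two-pointer sweep whose index only ever decreases across the whole loop.
import Mathlib
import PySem

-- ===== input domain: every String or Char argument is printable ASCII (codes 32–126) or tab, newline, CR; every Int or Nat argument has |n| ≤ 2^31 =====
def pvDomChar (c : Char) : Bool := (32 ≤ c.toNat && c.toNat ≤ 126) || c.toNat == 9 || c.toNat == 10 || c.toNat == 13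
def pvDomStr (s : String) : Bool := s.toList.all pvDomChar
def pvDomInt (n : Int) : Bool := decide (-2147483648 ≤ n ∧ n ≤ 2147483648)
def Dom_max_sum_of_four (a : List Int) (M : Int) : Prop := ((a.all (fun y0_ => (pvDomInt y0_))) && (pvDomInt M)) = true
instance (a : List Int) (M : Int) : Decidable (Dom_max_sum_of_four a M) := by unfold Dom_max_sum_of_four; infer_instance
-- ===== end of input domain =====

-- B replaces A's per-element binary search with a single two-pointer sweep over the
-- sorted pair sums (objective: alternative algorithm; same return value; the sort dominates the cost either way).

-- ===== PORT A =====
-- the 'for s1 in pair_sums: … break …' loop of A; L is the full sorted pair_sums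
def aLoop (L : List Int) (M : Int) : List Int → Int → Int
  | [], acc => acc
  | s1 :: rest, acc =>
    if s1 > M then acc
    else
      let pos : Int := (PySem.List.bisectRight L (M - s1) : Int) - 1
      if pos ≥ 0 then
        let s2 := PySem.List.pyGetD L pos 0
        aLoop L M rest (max acc (s1 + s2))
      else
        aLoop L M rest acc

def max_sum_of_four (a : List Int) (M : Int) : Int :=
  let n : Int := a.length
  let pair_sums : List Int :=
    (PySem.List.pyRange 0 n 1).foldl (fun ps i =>
      (PySem.List.pyRange 0 n 1).foldl (fun ps j =>
        ps ++ [PySem.List.pyGetD a i 0 + PySem.List.pyGetD a j 0]) ps) []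
  let pair_sums := PySem.List.sorted pair_sums (fun x => x) false
  aLoop pair_sums M pair_sums (-1)

-- ===== PORT B =====
-- the 'while j >= 0 and pair_sums[j] > M - s1: j -= 1' loop, with k = j + 1
def bFind (L : List Int) (t : Int) : Nat → Nat
  | 0 => 0
  | k + 1 => if PySem.List.pyGetD L (k : Int) 0 > t then bFind L t k else k + 1

-- B's 'for s1 in pair_sums' sweep carrying the pointer k = j + 1
def bLoop (L : List Int) (M : Int) : List Int → Nat → Int → Int
  | [], _, best => best
  | s1 :: rest, k, best =>
    if s1 > M then best
    else
      let k' := bFind L (M - s1) k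
      if k' > 0 then
        bLoop L M rest k' (max best (s1 + PySem.List.pyGetD L ((k' : Int) - 1) 0))
      else
        bLoop L M rest k' best

def max_sum_of_four_alt (a : List Int) (M : Int) : Int :=
  let pair_sums : List Int :=
    PySem.List.sorted (a.flatMap (fun x => a.map (fun y => x + y))) (fun x => x) false
  bLoop pair_sums M pair_sums pair_sums.length (-1)

-- ===== PRECONDITION & SPEC =====
def Spec_max_sum_of_four (a : List Int) (M : Int) (out : Int) : Prop := out = max_sum_of_four_alt a M
instance (a : List Int) (M : Int) (out : Int) : Decidable (Spec_max_sum_of_four a M out) := by unfold Spec_max_sum_of_four; infer_instance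

-- ===== CLAIM (what is proved, stated in full; the proofs are below) =====
def Claim_equal_max_sum_of_four : Prop := ∀ (a : List Int) (M : Int), Dom_max_sum_of_four a M → Spec_max_sum_of_four a M (max_sum_of_four a M)

-- ===== LEMMAS AND PROOFS =====

-- both programs enumerate the same multiset of pair sums (A by indices, B by elements)
lemma pair_sums_eq (a : List Int) :
    (PySem.List.pyRange 0 (a.length : Int) 1).foldl (fun ps i =>
      (PySem.List.pyRange 0 (a.length : Int) 1).foldl (fun ps j =>
        ps ++ [PySem.List.pyGetD a i 0 + PySem.List.pyGetD a j 0]) ps) []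
    = a.flatMap (fun x => a.map (fun y => x + y)) := by
  have hmap : (PySem.List.pyRange 0 (a.length : Int) 1).map (fun j => PySem.List.pyGetD a j 0) = a :=
    PySem.List.map_pyGetD_pyRange_zero' a 0
  have hinner : ∀ (c : Int) (ps : List Int),
      (PySem.List.pyRange 0 (a.length : Int) 1).foldl
        (fun ps j => ps ++ [c + PySem.List.pyGetD a j 0]) ps
      = ps ++ a.map (fun y => c + y) := by
    intro c ps
    rw [PySem.List.foldl_append_singleton_eq_map]
    rw [show (fun j => c + PySem.List.pyGetD a j 0)
        = (fun y => c + y) ∘ (fun j => PySem.List.pyGetD a j 0) from rfl]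
    rw [← List.map_map, hmap]
  calc (PySem.List.pyRange 0 (a.length : Int) 1).foldl (fun ps i =>
          (PySem.List.pyRange 0 (a.length : Int) 1).foldl (fun ps j =>
            ps ++ [PySem.List.pyGetD a i 0 + PySem.List.pyGetD a j 0]) ps) []
      = (PySem.List.pyRange 0 (a.length : Int) 1).foldl (fun ps i =>
          ps ++ a.map (fun y => PySem.List.pyGetD a i 0 + y)) [] := by
        simp only [hinner]
    _ = (PySem.List.pyRange 0 (a.length : Int) 1).flatMap
          (fun i => a.map (fun y => PySem.List.pyGetD a i 0 + y)) := by
        rw [PySem.List.foldl_append_eq_flatMap]; rfl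
    _ = ((PySem.List.pyRange 0 (a.length : Int) 1).map (fun j => PySem.List.pyGetD a j 0)).flatMap
          (fun x => a.map (fun y => x + y)) := by simp [List.flatMap_map]
    _ = a.flatMap (fun x => a.map (fun y => x + y)) := by rw [hmap]

-- bisectRight is monotone in the target on a sorted list
lemma bisectRight_mono (L : List Int) (hL : L.Pairwise (· ≤ ·)) {t t' : Int} (h : t ≤ t') :
    PySem.List.bisectRight L t ≤ PySem.List.bisectRight L t' := by
  by_contra hlt
  rw [not_le] at hlt
  have spec := PySem.List.bisectRight_spec L t hL
  have spec' := PySem.List.bisectRight_spec L t' hL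
  have hj : PySem.List.bisectRight L t' < L.length := lt_of_lt_of_le hlt spec.1
  have h1 : L[PySem.List.bisectRight L t'] ≤ t := spec.2.1 _ hj hlt
  have h2 : t' < L[PySem.List.bisectRight L t'] := spec'.2.2 _ hj le_rfl
  omega

-- the while loop lands exactly on bisect_right when it starts at or above it
lemma bFind_eq (L : List Int) (hL : L.Pairwise (· ≤ ·)) (t : Int) :
    ∀ k : Nat, PySem.List.bisectRight L t ≤ k → k ≤ L.length →
      bFind L t k = PySem.List.bisectRight L t := by
  intro k
  induction k with
  | zero => intro h1 _; simp [bFind]; omega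
  | succ k ih =>
    intro h1 h2
    have hk : k < L.length := by omega
    have spec := PySem.List.bisectRight_spec L t hL
    have hget : PySem.List.pyGetD L (k : Int) 0 = L[k] := by
      rw [PySem.List.pyGetD_eq_getElem L 0 (by positivity) (by exact_mod_cast hk)]
      simp
    simp only [bFind, hget]
    by_cases hc : L[k] > t
    · have hle : PySem.List.bisectRight L t ≤ k := by
        by_contra hgt
        have heq : PySem.List.bisectRight L t = k + 1 := by omega
        have := spec.2.1 k hk (by omega)
        omega
      rw [if_pos hc]
      exact ih hle (by omega)
    · have heq : PySem.List.bisectRight L t = k + 1 := by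
        by_contra hne
        have hle : PySem.List.bisectRight L t ≤ k := by omega
        have := spec.2.2 k hk hle
        omega
      rw [if_neg hc, heq]

-- the two sweeps agree when the pointer dominates every remaining bisect position
lemma loop_eq (L : List Int) (M : Int) (hL : L.Pairwise (· ≤ ·)) :
    ∀ (rest : List Int) (k : Nat) (acc : Int),
      rest.Pairwise (· ≤ ·) →
      (∀ s ∈ rest, PySem.List.bisectRight L (M - s) ≤ k) →
      k ≤ L.length →
      bLoop L M rest k acc = aLoop L M rest acc := by
  intro rest
  induction rest with
  | nil => intro k acc _ _ _; simp [bLoop, aLoop]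
  | cons s1 rest ih =>
    intro k acc hpw hbound hk
    obtain ⟨hrel, hpw'⟩ := List.pairwise_cons.mp hpw
    simp only [bLoop, aLoop]
    by_cases hs : s1 > M
    · rw [if_pos hs, if_pos hs]
    rw [if_neg hs, if_neg hs]
    have hb1 : PySem.List.bisectRight L (M - s1) ≤ k := hbound s1 (List.mem_cons_self ..)
    have hk' : bFind L (M - s1) k = PySem.List.bisectRight L (M - s1) :=
      bFind_eq L hL (M - s1) k hb1 hk
    have hrest : ∀ s ∈ rest, PySem.List.bisectRight L (M - s) ≤ bFind L (M - s1) k := by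
      intro s hsmem
      rw [hk']
      exact bisectRight_mono L hL (by have := hrel s hsmem; omega)
    have hklen : bFind L (M - s1) k ≤ L.length := by
      rw [hk']; exact (PySem.List.bisectRight_spec L (M - s1) hL).1
    by_cases hpos : bFind L (M - s1) k > 0
    · rw [if_pos hpos, if_pos (by rw [hk'] at hpos; omega :
        (PySem.List.bisectRight L (M - s1) : Int) - 1 ≥ 0)]
      rw [ih _ _ hpw' hrest hklen, hk']
    · rw [if_neg hpos, if_neg (by rw [hk'] at hpos; omega :
        ¬ ((PySem.List.bisectRight L (M - s1) : Int) - 1 ≥ 0))]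
      exact ih _ _ hpw' hrest hklen

-- ===== VERDICT (by name: the statement is the Claim_ definition above) =====
theorem max_sum_of_four_spec : Claim_equal_max_sum_of_four := by
  intro a M _
  unfold Spec_max_sum_of_four max_sum_of_four max_sum_of_four_alt
  simp only [pair_sums_eq]
  set L := PySem.List.sorted (a.flatMap (fun x => a.map (fun y => x + y))) (fun x => x) false with hLdef
  have hL : L.Pairwise (· ≤ ·) := PySem.List.sorted_pairwise _ _
  exact (loop_eq L M hL L L.length (-1) hL
    (fun s _ => (PySem.List.bisectRight_spec L (M - s) hL).1) le_rfl).symm
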